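-- pv_equiv track=rewrite | github.com/Ch1nyzzz/OptiHarness | src/memomemo/scaffolds/bm25_scaffold.py | _expand_indices
-- ===== SOURCE A (Python) =====
-- def _expand_indices(anchors: list[int], n: int, window: int) -> list[int]:
--     seen: set[int] = set()
--     out: list[int] = []
--     for anchor in sorted(anchors):
--         for idx in range(max(0, anchor - window), min(n, anchor + window + 1)):
--             if idx not in seen:
--                 seen.add(idx)
--                 out.append(idx)
--     return out
-- ===== SOURCE B (Python) =====
-- def _expand_indices(anchors: list[int], n: int, window: int) -> list[int]:
--     out: list[int] = []
--     nxt = 0  # one past the largest index emitted so far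
--     for anchor in sorted(anchors):
--         lo = max(anchor - window, 0, nxt)
--         hi = min(n, anchor + window + 1)
--         if lo < hi:
--             out.extend(range(lo, hi))
--             nxt = hi
--     return out
-- ===== Notes on version B (the rewrite author's own statement) =====
-- stated objective: faster
-- what changed: Instead of probing a 'seen' set for every index of every window, B exploits that windows of sorted anchors have nondecreasing endpoints: it keeps a single cursor (one past the largest emitted index), clips each window to start at the cursor and emits the whole remaining range at once, so the per-index membership test disappears.
import Mathlib
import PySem

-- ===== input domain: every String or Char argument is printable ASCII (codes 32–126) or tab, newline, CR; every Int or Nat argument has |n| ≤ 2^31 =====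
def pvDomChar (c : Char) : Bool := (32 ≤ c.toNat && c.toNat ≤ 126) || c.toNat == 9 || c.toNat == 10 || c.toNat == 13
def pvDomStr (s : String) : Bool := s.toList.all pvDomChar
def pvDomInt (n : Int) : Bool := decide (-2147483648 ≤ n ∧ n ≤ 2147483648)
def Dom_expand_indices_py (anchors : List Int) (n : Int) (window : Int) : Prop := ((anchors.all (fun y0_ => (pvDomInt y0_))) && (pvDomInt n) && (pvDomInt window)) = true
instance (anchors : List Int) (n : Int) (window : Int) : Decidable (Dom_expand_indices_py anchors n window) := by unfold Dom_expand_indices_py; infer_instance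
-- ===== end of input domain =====

-- B replaces A's per-index 'seen' membership test by a single cursor over the sorted anchors'
-- windows (their endpoints are nondecreasing), emitting each clipped window as one range: faster.

-- ===== PORT A =====
-- inner loop body: 'if idx not in seen: seen.add(idx); out.append(idx)'
def pvStepA (st : PySem.Set Int × List Int) (idx : Int) : PySem.Set Int × List Int :=
  if PySem.Set.contains st.1 idx then st else (PySem.Set.add st.1 idx, st.2 ++ [idx])

-- body of 'for anchor in sorted(anchors)': the inner 'for idx in range(...)' loop
def pvInnerA (n window : Int) (st : PySem.Set Int × List Int) (anchor : Int) :
    PySem.Set Int × List Int :=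
  (PySem.List.pyRange (max 0 (anchor - window)) (min n (anchor + window + 1)) 1).foldl pvStepA st

def expand_indices_py (anchors : List Int) (n : Int) (window : Int) : List Int :=
  ((PySem.List.sorted anchors (fun x => x) false).foldl (pvInnerA n window)
    ((PySem.Set.empty : PySem.Set Int), ([] : List Int))).2

-- ===== PORT B =====
-- body of B's loop: clip the window to start at the cursor, emit the whole remaining range
def pvStepB (n window : Int) (st : List Int × Int) (anchor : Int) : List Int × Int :=
  let lo := max (max (anchor - window) 0) st.2
  let hi := min n (anchor + window + 1)
  if lo < hi then (st.1 ++ PySem.List.pyRange lo hi 1, hi) else st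

def expand_indices_py_alt (anchors : List Int) (n : Int) (window : Int) : List Int :=
  ((PySem.List.sorted anchors (fun x => x) false).foldl (pvStepB n window)
    (([] : List Int), (0 : Int))).1

-- ===== PRECONDITION & SPEC =====
def Spec_expand_indices_py (anchors : List Int) (n : Int) (window : Int) (out : List Int) : Prop := out = expand_indices_py_alt anchors n window
instance (anchors : List Int) (n : Int) (window : Int) (out : List Int) : Decidable (Spec_expand_indices_py anchors n window out) := by unfold Spec_expand_indices_py; infer_instance

-- ===== CLAIM (what is proved, stated in full; the proofs are below) =====
def Claim_equal_expand_indices_py : Prop := ∀ (anchors : List Int) (n : Int) (window : Int), Dom_expand_indices_py anchors n window → Spec_expand_indices_py anchors n window (expand_indices_py anchors n window)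

-- ===== LEMMAS AND PROOFS =====

-- A's inner loop, run from a state whose 'seen' set is exactly the already-emitted indices
-- (all < nxt, and containing every index ≥ s below nxt), appends exactly the range [max s nxt, hi)
-- and adds those indices to 'seen'.
lemma pvInner_spec : ∀ (fuel : Nat) (s hi : Int), (hi - s).toNat = fuel →
    ∀ (seen : PySem.Set Int) (out : List Int) (nxt : Int),
    (∀ x, x ∈ seen → x < nxt) →
    (∀ x, s ≤ x → x < nxt → x ∈ seen) →
    ∃ seen' : PySem.Set Int,
      (PySem.List.pyRange s hi 1).foldl pvStepA (seen, out)
        = (seen', out ++ PySem.List.pyRange (max s nxt) hi 1)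
      ∧ (∀ x, x ∈ seen' ↔ (x ∈ seen ∨ (max s nxt ≤ x ∧ x < hi))) := by
  intro fuel
  induction fuel with
  | zero =>
    intro s hi hfuel seen out nxt h1 h2
    have hle : hi ≤ s := by omega
    refine ⟨seen, ?_, ?_⟩
    · rw [PySem.List.pyRange_one_eq_nil hle, PySem.List.pyRange_one_eq_nil (by omega)]
      simp
    · intro x; constructor
      · exact fun h => Or.inl h
      · rintro (h | ⟨hx1, hx2⟩)
        · exact h
        · omega
  | succ fuel ih =>
    intro s hi hfuel seen out nxt h1 h2
    by_cases hs : s < hi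
    · rw [PySem.List.pyRange_one_cons hs]
      simp only [List.foldl_cons]
      by_cases hmem : s ∈ seen
      · -- already seen: state unchanged, s < nxt
        have hsn : s < nxt := h1 s hmem
        have hstep : pvStepA (seen, out) s = (seen, out) := by
          simp [pvStepA, hmem]
        rw [hstep]
        obtain ⟨seen', heq, hchar⟩ := ih (s + 1) hi (by omega) seen out nxt h1
          (fun x hx1 hx2 => h2 x (by omega) hx2)
        have hmax : max (s + 1) nxt = max s nxt := by omega
        rw [hmax] at heq hchar
        exact ⟨seen', heq, hchar⟩
      · -- new index: emitted, and nxt ≤ s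
        have hsn : nxt ≤ s := by
          by_contra h; exact hmem (h2 s le_rfl (by omega))
        have hstep : pvStepA (seen, out) s = (PySem.Set.add seen s, out ++ [s]) := by
          simp [pvStepA, hmem]
        rw [hstep]
        obtain ⟨seen', heq, hchar⟩ := ih (s + 1) hi (by omega) (PySem.Set.add seen s)
          (out ++ [s]) (s + 1)
          (by intro x hx
              rw [PySem.Set.mem_add] at hx
              rcases hx with hx | hx
              · exact lt_of_lt_of_le (h1 x hx) (by omega)
              · omega)
          (by intro x hx1 hx2; omega)
        refine ⟨seen', ?_, ?_⟩
        · rw [heq]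
          have hms : max s nxt = s := by omega
          have hm1 : max (s + 1) (s + 1) = s + 1 := by omega
          rw [hm1, hms, PySem.List.pyRange_one_cons hs]
          simp
        · intro x
          rw [hchar x, PySem.Set.mem_add]
          constructor
          · rintro ((h | h) | h)
            · exact Or.inl h
            · right; omega
            · right; omega
          · rintro (h | ⟨hx1, hx2⟩)
            · exact Or.inl (Or.inl h)
            · by_cases hxs : x = s + 0
              · left; right; omega
              · right; omega
    · have hle : hi ≤ s := by omega
      refine ⟨seen, ?_, ?_⟩
      · rw [PySem.List.pyRange_one_eq_nil hle, PySem.List.pyRange_one_eq_nil (by omega)]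
        simp
      · intro x; constructor
        · exact fun h => Or.inl h
        · rintro (h | ⟨hx1, hx2⟩)
          · exact h
          · omega

-- the outer loops agree on any sorted remainder, given the cursor invariant
lemma pvOuter_spec (n window : Int) : ∀ (l : List Int), l.Pairwise (· ≤ ·) →
    ∀ (seen : PySem.Set Int) (out : List Int) (nxt : Int),
    (∀ x, x ∈ seen → x < nxt) →
    (∀ a ∈ l, ∀ x, max 0 (a - window) ≤ x → x < nxt → x ∈ seen) →
    (l.foldl (pvInnerA n window) (seen, out)).2 = (l.foldl (pvStepB n window) (out, nxt)).1 := by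
  intro l
  induction l with
  | nil => intro _ seen out nxt _ _; rfl
  | cons a t ih =>
    intro hsorted seen out nxt h1 h2
    have hta : ∀ b ∈ t, a ≤ b := fun b hb => (List.pairwise_cons.mp hsorted).1 b hb
    have hts : t.Pairwise (· ≤ ·) := (List.pairwise_cons.mp hsorted).2
    simp only [List.foldl_cons]
    set s := max 0 (a - window) with hs
    set hi := min n (a + window + 1) with hhi
    obtain ⟨seen', heq, hchar⟩ := pvInner_spec (hi - s).toNat s hi rfl seen out nxt h1
      (h2 a (List.mem_cons_self) )
    have hinner : pvInnerA n window (seen, out) a = (seen', out ++ PySem.List.pyRange (max s nxt) hi 1) := by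
      simp only [pvInnerA, ← hs, ← hhi]; exact heq
    rw [hinner]
    -- B's step
    have hlo : max (max (a - window) 0) nxt = max s nxt := by omega
    by_cases hcase : max s nxt < hi
    · have hstepB : pvStepB n window (out, nxt) a
          = (out ++ PySem.List.pyRange (max s nxt) hi 1, hi) := by
        simp only [pvStepB, hlo, ← hhi]
        rw [if_pos hcase]
      rw [hstepB]
      apply ih hts
      · intro x hx
        rcases (hchar x).mp hx with h | h
        · exact lt_of_lt_of_le (h1 x h) (by omega)
        · omega
      · intro b hb x hx1 hx2
        have hab : a ≤ b := hta b hb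
        rw [hchar x]
        by_cases hxn : x < nxt
        · exact Or.inl (h2 a (List.mem_cons_self) x (by omega) hxn)
        · right; omega
    · have hempty : PySem.List.pyRange (max s nxt) hi 1 = [] :=
        PySem.List.pyRange_one_eq_nil (by omega)
      have hstepB : pvStepB n window (out, nxt) a = (out, nxt) := by
        simp only [pvStepB, hlo, ← hhi]
        rw [if_neg (by omega)]
      rw [hstepB, hempty, List.append_nil]
      apply ih hts
      · intro x hx
        rcases (hchar x).mp hx with h | h
        · exact h1 x h
        · omega
      · intro b hb x hx1 hx2
        have hab : a ≤ b := hta b hb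
        rw [hchar x]
        exact Or.inl (h2 a (List.mem_cons_self) x (by omega) hx2)

-- ===== VERDICT (by name: the statement is the Claim_ definition above) =====
theorem expand_indices_py_spec : Claim_equal_expand_indices_py := by
  intro anchors n window _
  unfold Spec_expand_indices_py expand_indices_py expand_indices_py_alt
  apply pvOuter_spec n window (PySem.List.sorted anchors (fun x => x) false)
    (PySem.List.sorted_pairwise anchors (fun x => x))
  · intro x hx; simp [PySem.Set.empty] at hx
  · intro a _ x hx1 hx2; omega
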